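-- pv_equiv track=rewrite | github.com/JAMESLEONARDGRIJALBABOLANOS/BancoUdea | scripts/normalize_trivy.py | _determine_iac_type
-- ===== SOURCE A (Python) =====
-- from typing import Any, Dict, List, Optional
--
-- def _determine_iac_type(result: Dict[str, Any]) -> str:
--     """Determine IaC type from result."""
--     target = result.get("Target", "").lower()
--
--     if "dockerfile" in target:
--         return "dockerfile"
--     elif any(k8s in target for k8s in [".yaml", ".yml", "k8s", "kubernetes"]):
--         return "kubernetes"
--     elif ".tf" in target or "terraform" in target:
--         return "terraform"
--     elif "cloudformation" in target:
--         return "cloudformation"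
--
--     return "unknown"
-- ===== SOURCE B (Python) =====
-- # B: flat keyword -> (priority, label) map; collect all matching keywords, return the
-- # label of the minimum-priority hit (instead of A's short-circuit if/elif chain).
-- _KEYWORDS = {
--     "dockerfile": (0, "dockerfile"),
--     ".yaml": (1, "kubernetes"),
--     ".yml": (1, "kubernetes"),
--     "k8s": (1, "kubernetes"),
--     "kubernetes": (1, "kubernetes"),
--     ".tf": (2, "terraform"),
--     "terraform": (2, "terraform"),
--     "cloudformation": (3, "cloudformation"),
-- }
--
-- def _determine_iac_type(result):
--     target = result.get("Target", "").lower()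
--     hits = [v for kw, v in _KEYWORDS.items() if kw in target]
--     return min(hits)[1] if hits else "unknown"
-- ===== Notes on version B (the rewrite author's own statement) =====
-- stated objective: alternative
-- what changed: Instead of a short-circuiting priority chain of grouped checks, B uses a flat keyword->(priority,label) map, collects ALL matching keywords in one comprehension and returns the label of the minimum-priority hit.
import Mathlib
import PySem

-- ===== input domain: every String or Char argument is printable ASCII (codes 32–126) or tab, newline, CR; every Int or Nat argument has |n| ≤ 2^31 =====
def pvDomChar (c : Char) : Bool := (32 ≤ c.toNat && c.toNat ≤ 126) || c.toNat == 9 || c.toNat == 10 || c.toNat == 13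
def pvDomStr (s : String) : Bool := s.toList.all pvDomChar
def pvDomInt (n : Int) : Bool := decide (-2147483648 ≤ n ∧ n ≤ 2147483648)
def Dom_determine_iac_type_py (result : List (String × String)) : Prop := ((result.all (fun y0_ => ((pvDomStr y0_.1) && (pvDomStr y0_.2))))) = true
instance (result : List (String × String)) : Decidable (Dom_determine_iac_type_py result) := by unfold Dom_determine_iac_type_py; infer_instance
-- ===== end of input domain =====

-- B replaces A's short-circuiting if/elif priority chain by a flat keyword→(priority,label)
-- map: collect every matching keyword, return the label of the minimum-priority hit (alternative, same cost).

-- ===== PORT A =====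
def determine_iac_type_py (result : List (String × String)) : String :=
  let target := PySem.Str.lower ((PySem.Dict.ofList result).getD "Target" "")
  if PySem.Str.isIn "dockerfile" target then "dockerfile"
  else if [".yaml", ".yml", "k8s", "kubernetes"].any (fun k8s => PySem.Str.isIn k8s target) then "kubernetes"
  else if PySem.Str.isIn ".tf" target || PySem.Str.isIn "terraform" target then "terraform"
  else if PySem.Str.isIn "cloudformation" target then "cloudformation"
  else "unknown"

-- ===== PORT B =====
def iacKeywords : List (String × (Int × String)) :=
  [ ("dockerfile", (0, "dockerfile"))
  , (".yaml", (1, "kubernetes"))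
  , (".yml", (1, "kubernetes"))
  , ("k8s", (1, "kubernetes"))
  , ("kubernetes", (1, "kubernetes"))
  , (".tf", (2, "terraform"))
  , ("terraform", (2, "terraform"))
  , ("cloudformation", (3, "cloudformation")) ]

-- Python's min on (priority, label) tuples is ported as min? keyed on the priority: tuples
-- with equal priority are identical here, so the lexicographic tuple order agrees with the key order.
def determine_iac_type_py_alt (result : List (String × String)) : String :=
  let target := PySem.Str.lower ((PySem.Dict.ofList result).getD "Target" "")
  let hits := iacKeywords.filterMap (fun p => if PySem.Str.isIn p.1 target then some p.2 else none)
  match PySem.List.min? hits (fun v => v.1) with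
  | some v => v.2
  | none => "unknown"

-- ===== PRECONDITION & SPEC =====
def Spec_determine_iac_type_py (result : List (String × String)) (out : String) : Prop := out = determine_iac_type_py_alt result
instance (result : List (String × String)) (out : String) : Decidable (Spec_determine_iac_type_py result out) := by unfold Spec_determine_iac_type_py; infer_instance

-- ===== CLAIM (what is proved, stated in full; the proofs are below) =====
def Claim_equal_determine_iac_type_py : Prop := ∀ (result : List (String × String)), Dom_determine_iac_type_py result → Spec_determine_iac_type_py result (determine_iac_type_py result)

-- ===== LEMMAS AND PROOFS =====
theorem iac_core (t : String) :
    (if PySem.Str.isIn "dockerfile" t then "dockerfile"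
     else if [".yaml", ".yml", "k8s", "kubernetes"].any (fun k8s => PySem.Str.isIn k8s t) then "kubernetes"
     else if PySem.Str.isIn ".tf" t || PySem.Str.isIn "terraform" t then "terraform"
     else if PySem.Str.isIn "cloudformation" t then "cloudformation"
     else "unknown")
    = (match PySem.List.min?
          (iacKeywords.filterMap (fun p => if PySem.Str.isIn p.1 t then some p.2 else none))
          (fun v => v.1) with
       | some v => v.2
       | none => "unknown") := by
  simp only [iacKeywords, List.any_cons, List.any_nil, Bool.or_false, List.filterMap]
  cases h1 : PySem.Str.isIn "dockerfile" t <;>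
  cases h2 : PySem.Str.isIn ".yaml" t <;>
  cases h3 : PySem.Str.isIn ".yml" t <;>
  cases h4 : PySem.Str.isIn "k8s" t <;>
  cases h5 : PySem.Str.isIn "kubernetes" t <;>
  cases h6 : PySem.Str.isIn ".tf" t <;>
  cases h7 : PySem.Str.isIn "terraform" t <;>
  cases h8 : PySem.Str.isIn "cloudformation" t <;>
  rfl

-- ===== VERDICT (by name: the statement is the Claim_ definition above) =====
theorem determine_iac_type_py_spec : Claim_equal_determine_iac_type_py := by
  intro result _
  unfold Spec_determine_iac_type_py determine_iac_type_py determine_iac_type_py_alt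
  exact iac_core _
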